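-- pv_equiv track=rewrite | github.com/simoneheo/gui8 | trash/comparison_wizard_manager2.py | _determine_overlay_type
-- ===== SOURCE A (Python) =====
-- def _determine_overlay_type(overlay_id, method_name):
--     """Determine the overlay type based on overlay_id and comparison method"""
--     overlay_id_lower = overlay_id.lower()
--     method_lower = method_name.lower()
--
--     # Method-specific overlay type detection
--     if 'bland' in method_lower:
--         if 'bias' in overlay_id_lower:
--             return 'line'
--         elif 'limit' in overlay_id_lower:
--             return 'line'
--         elif 'confidence' in overlay_id_lower:
--             return 'fill'
--         elif 'statistical' in overlay_id_lower:
--             return 'text'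
--     elif 'correlation' in method_lower:
--         if 'regression' in overlay_id_lower or 'identity' in overlay_id_lower:
--             return 'line'
--         elif 'statistical' in overlay_id_lower:
--             return 'text'
--
--     # Generic overlay type detection
--     if any(keyword in overlay_id_lower for keyword in ['line', 'bias', 'limit', 'regression', 'identity']):
--         return 'line'
--     elif any(keyword in overlay_id_lower for keyword in ['confidence', 'interval', 'fill', 'shading']):
--         return 'fill'
--     elif any(keyword in overlay_id_lower for keyword in ['text', 'statistical', 'result']):
--         return 'text'
--     elif any(keyword in overlay_id_lower for keyword in ['marker', 'point']):
--         return 'marker'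
--
--     # Default to line type
--     return 'line'
-- ===== SOURCE B (Python) =====
-- # Different strategy from the if/elif cascades: compute ONCE the set of generic
-- # keywords occurring in overlay_id, then select the answer as the MINIMUM-priority
-- # matched entry (priorities mirror the specified precedence); no ordered
-- # first-match scanning. Correct because priorities are distinct, so the unique
-- # minimum-priority match equals the first match of the precedence order.
--
-- _GENERIC = {
--     'line': (0, 'line'), 'bias': (1, 'line'), 'limit': (2, 'line'),
--     'regression': (3, 'line'), 'identity': (4, 'line'),
--     'confidence': (5, 'fill'), 'interval': (6, 'fill'), 'fill': (7, 'fill'),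
--     'shading': (8, 'fill'),
--     'text': (9, 'text'), 'statistical': (10, 'text'), 'result': (11, 'text'),
--     'marker': (12, 'marker'), 'point': (13, 'marker'),
-- }
--
-- _BLAND = {'bias': (0, 'line'), 'limit': (1, 'line'),
--           'confidence': (2, 'fill'), 'statistical': (3, 'text')}
--
-- _CORRELATION = {'regression': (0, 'line'), 'identity': (1, 'line'),
--                 'statistical': (2, 'text')}
--
--
-- def _determine_overlay_type(overlay_id, method_name):
--     oid = overlay_id.lower()
--     ml = method_name.lower()
--     matched = {kw for kw in _GENERIC if kw in oid}
--     if 'bland' in ml: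
--         hit = min((_BLAND[kw] for kw in matched & _BLAND.keys()), default=None)
--     elif 'correlation' in ml:
--         hit = min((_CORRELATION[kw] for kw in matched & _CORRELATION.keys()),
--                   default=None)
--     else:
--         hit = None
--     if hit is None:
--         hit = min((_GENERIC[kw] for kw in matched), default=(0, 'line'))
--     return hit[1]
-- ===== Notes on version B (the rewrite author's own statement) =====
-- stated objective: alternative
-- what changed: B computes the set of matched generic keywords in one pass and then selects the answer as the minimum-priority matched entry of a keyword->(priority,type) table (min over a set), instead of A's ordered if/elif first-match cascades.
import Mathlib
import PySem

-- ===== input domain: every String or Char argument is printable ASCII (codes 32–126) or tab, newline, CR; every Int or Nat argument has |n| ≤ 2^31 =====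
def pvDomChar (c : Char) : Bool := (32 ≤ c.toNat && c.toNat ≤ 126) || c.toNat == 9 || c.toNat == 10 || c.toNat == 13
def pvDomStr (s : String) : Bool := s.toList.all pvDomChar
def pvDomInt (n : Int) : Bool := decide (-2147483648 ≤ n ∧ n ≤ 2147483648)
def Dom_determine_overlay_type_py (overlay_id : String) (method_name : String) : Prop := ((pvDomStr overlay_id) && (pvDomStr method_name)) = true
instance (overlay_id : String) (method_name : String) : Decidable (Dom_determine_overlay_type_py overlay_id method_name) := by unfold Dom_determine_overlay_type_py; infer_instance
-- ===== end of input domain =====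

-- B computes the set of matched generic keywords once and selects the minimum-priority
-- entry, instead of A's ordered if/elif first-match cascades (objective: alternative).

-- ===== PORT A =====
def determine_overlay_type_py (overlay_id : String) (method_name : String) : String :=
  let overlay_id_lower := PySem.Str.lower overlay_id
  let method_lower := PySem.Str.lower method_name
  if PySem.Str.isIn "bland" method_lower then
    if PySem.Str.isIn "bias" overlay_id_lower then "line"
    else if PySem.Str.isIn "limit" overlay_id_lower then "line"
    else if PySem.Str.isIn "confidence" overlay_id_lower then "fill"
    else if PySem.Str.isIn "statistical" overlay_id_lower then "text"
    else
      -- fall through to the generic detection below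
      if ["line", "bias", "limit", "regression", "identity"].any (fun k => PySem.Str.isIn k overlay_id_lower) then "line"
      else if ["confidence", "interval", "fill", "shading"].any (fun k => PySem.Str.isIn k overlay_id_lower) then "fill"
      else if ["text", "statistical", "result"].any (fun k => PySem.Str.isIn k overlay_id_lower) then "text"
      else if ["marker", "point"].any (fun k => PySem.Str.isIn k overlay_id_lower) then "marker"
      else "line"
  else if PySem.Str.isIn "correlation" method_lower then
    if PySem.Str.isIn "regression" overlay_id_lower || PySem.Str.isIn "identity" overlay_id_lower then "line"
    else if PySem.Str.isIn "statistical" overlay_id_lower then "text"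
    else
      if ["line", "bias", "limit", "regression", "identity"].any (fun k => PySem.Str.isIn k overlay_id_lower) then "line"
      else if ["confidence", "interval", "fill", "shading"].any (fun k => PySem.Str.isIn k overlay_id_lower) then "fill"
      else if ["text", "statistical", "result"].any (fun k => PySem.Str.isIn k overlay_id_lower) then "text"
      else if ["marker", "point"].any (fun k => PySem.Str.isIn k overlay_id_lower) then "marker"
      else "line"
  else
    if ["line", "bias", "limit", "regression", "identity"].any (fun k => PySem.Str.isIn k overlay_id_lower) then "line"
    else if ["confidence", "interval", "fill", "shading"].any (fun k => PySem.Str.isIn k overlay_id_lower) then "fill"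
    else if ["text", "statistical", "result"].any (fun k => PySem.Str.isIn k overlay_id_lower) then "text"
    else if ["marker", "point"].any (fun k => PySem.Str.isIn k overlay_id_lower) then "marker"
    else "line"

-- ===== PORT B =====
-- Source B's _GENERIC / _BLAND / _CORRELATION dicts (keyword -> (priority, type)), insertion order
def pvGenericTbl : List (String × (Int × String)) :=
  [("line", (0, "line")), ("bias", (1, "line")), ("limit", (2, "line")),
   ("regression", (3, "line")), ("identity", (4, "line")),
   ("confidence", (5, "fill")), ("interval", (6, "fill")), ("fill", (7, "fill")),
   ("shading", (8, "fill")),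
   ("text", (9, "text")), ("statistical", (10, "text")), ("result", (11, "text")),
   ("marker", (12, "marker")), ("point", (13, "marker"))]

def pvBlandTbl : List (String × (Int × String)) :=
  [("bias", (0, "line")), ("limit", (1, "line")),
   ("confidence", (2, "fill")), ("statistical", (3, "text"))]

def pvCorrTbl : List (String × (Int × String)) :=
  [("regression", (0, "line")), ("identity", (1, "line")), ("statistical", (2, "text"))]

-- Python's min over (Int, str) tuples: lexicographic minimum, first extremal kept
def pvMinOpt : List (Int × String) → Option (Int × String)
  | [] => none
  | p :: rest =>
      match pvMinOpt rest with
      | none => some p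
      | some q => if p.1 < q.1 ∨ (p.1 = q.1 ∧ p.2 < q.2) then some p else some q

-- dict lookup tbl[kw] (callers only look up keys present in the table)
def pvLookup (tbl : List (String × (Int × String))) (kw : String) : Int × String :=
  ((tbl.lookup kw).getD (0, ""))

-- 'matched & tbl.keys()' then min of looked-up entries; Python's set-iteration order is
-- irrelevant here because each table's priorities are distinct, so the minimum is unique
def pvMinHit (tbl : List (String × (Int × String))) (matched : List String) : Option (Int × String) :=
  pvMinOpt ((matched.filter (fun kw => (tbl.map (·.1)).contains kw)).map (pvLookup tbl))

def determine_overlay_type_py_alt (overlay_id : String) (method_name : String) : String :=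
  let oid := PySem.Str.lower overlay_id
  let ml := PySem.Str.lower method_name
  -- {kw for kw in _GENERIC if kw in oid}, kept in insertion order
  let matched := (pvGenericTbl.map (·.1)).filter (fun kw => PySem.Str.isIn kw oid)
  let hit :=
    if PySem.Str.isIn "bland" ml then pvMinHit pvBlandTbl matched
    else if PySem.Str.isIn "correlation" ml then pvMinHit pvCorrTbl matched
    else none
  (hit.getD ((pvMinHit pvGenericTbl matched).getD (0, "line"))).2

-- ===== PRECONDITION & SPEC =====
def Spec_determine_overlay_type_py (overlay_id : String) (method_name : String) (out : String) : Prop := out = determine_overlay_type_py_alt overlay_id method_name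
instance (overlay_id : String) (method_name : String) (out : String) : Decidable (Spec_determine_overlay_type_py overlay_id method_name out) := by unfold Spec_determine_overlay_type_py; infer_instance

-- ===== CLAIM =====
def Claim_equal_determine_overlay_type_py : Prop := ∀ (overlay_id : String) (method_name : String), Dom_determine_overlay_type_py overlay_id method_name → Spec_determine_overlay_type_py overlay_id method_name (determine_overlay_type_py overlay_id method_name)

-- ===== LEMMAS AND PROOFS =====

-- Python's min over a list whose first components strictly ascend is its first element
theorem pvMinOpt_pairwise (l : List (Int × String))
    (h : l.Pairwise (fun a b => a.1 < b.1)) : pvMinOpt l = l.head? := by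
  induction l with
  | nil => rfl
  | cons x xs ih =>
    have hx := ih (List.Pairwise.sublist (List.sublist_cons_self x xs) h)
    cases xs with
    | nil => rfl
    | cons y ys =>
      have hlt : x.1 < y.1 := (List.pairwise_cons.mp h).1 y (by simp)
      simp only [pvMinOpt] at hx ⊢
      rw [hx]
      simp [hlt]

-- pvMinHit over the matched sublist of the generic keys is the FIRST matching table key,
-- because each table's priorities ascend along the generic-key order (the Pairwise premise)
theorem pvMinHit_eq (tbl : List (String × (Int × String))) (p : String → Bool)
    (h : (((pvGenericTbl.map (·.1)).filter (fun kw => (tbl.map (·.1)).contains kw)).map (pvLookup tbl)).Pairwise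
          (fun a b => a.1 < b.1)) :
    pvMinHit tbl ((pvGenericTbl.map (·.1)).filter p)
      = ((pvGenericTbl.map (·.1)).find? (fun kw => (tbl.map (·.1)).contains kw && p kw)).map (pvLookup tbl) := by
  unfold pvMinHit
  rw [pvMinOpt_pairwise _
      (h.sublist (List.Sublist.map _ (List.Sublist.filter _ List.filter_sublist)))]
  rw [List.filter_filter, List.head?_map, List.head?_filter]

theorem pvMinHit_bland (p : String → Bool) :
    pvMinHit pvBlandTbl ((pvGenericTbl.map (·.1)).filter p)
      = ((pvGenericTbl.map (·.1)).find? (fun kw => (pvBlandTbl.map (·.1)).contains kw && p kw)).map (pvLookup pvBlandTbl) :=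
  pvMinHit_eq _ _ (by decide)

theorem pvMinHit_corr (p : String → Bool) :
    pvMinHit pvCorrTbl ((pvGenericTbl.map (·.1)).filter p)
      = ((pvGenericTbl.map (·.1)).find? (fun kw => (pvCorrTbl.map (·.1)).contains kw && p kw)).map (pvLookup pvCorrTbl) :=
  pvMinHit_eq _ _ (by decide)

theorem pvMinHit_gen (p : String → Bool) :
    pvMinHit pvGenericTbl ((pvGenericTbl.map (·.1)).filter p)
      = ((pvGenericTbl.map (·.1)).find? (fun kw => (pvGenericTbl.map (·.1)).contains kw && p kw)).map (pvLookup pvGenericTbl) :=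
  pvMinHit_eq _ _ (by decide)

-- ===== VERDICT =====
set_option maxHeartbeats 1000000 in
theorem determine_overlay_type_py_spec : Claim_equal_determine_overlay_type_py := by
  intro overlay_id method_name _
  unfold Spec_determine_overlay_type_py determine_overlay_type_py determine_overlay_type_py_alt
  simp only [pvMinHit_bland, pvMinHit_corr, pvMinHit_gen]
  simp only [pvGenericTbl, pvBlandTbl, pvCorrTbl, List.map, List.find?,
    List.contains_cons, List.any_cons, List.any_nil, Bool.or_false, beq_self_eq_true]
  generalize PySem.Str.isIn "bland" (PySem.Str.lower method_name) = m1
  generalize PySem.Str.isIn "correlation" (PySem.Str.lower method_name) = m2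
  generalize PySem.Str.isIn "bias" (PySem.Str.lower overlay_id) = b1
  generalize PySem.Str.isIn "limit" (PySem.Str.lower overlay_id) = b2
  generalize PySem.Str.isIn "confidence" (PySem.Str.lower overlay_id) = b3
  generalize PySem.Str.isIn "statistical" (PySem.Str.lower overlay_id) = b4
  generalize PySem.Str.isIn "regression" (PySem.Str.lower overlay_id) = b5
  generalize PySem.Str.isIn "identity" (PySem.Str.lower overlay_id) = b6
  generalize PySem.Str.isIn "line" (PySem.Str.lower overlay_id) = b7
  generalize PySem.Str.isIn "interval" (PySem.Str.lower overlay_id) = b8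
  generalize PySem.Str.isIn "fill" (PySem.Str.lower overlay_id) = b9
  generalize PySem.Str.isIn "shading" (PySem.Str.lower overlay_id) = b10
  generalize PySem.Str.isIn "text" (PySem.Str.lower overlay_id) = b11
  generalize PySem.Str.isIn "result" (PySem.Str.lower overlay_id) = b12
  generalize PySem.Str.isIn "marker" (PySem.Str.lower overlay_id) = b13
  generalize PySem.Str.isIn "point" (PySem.Str.lower overlay_id) = b14
  revert m1 m2 b1 b2 b3 b4 b5 b6 b7 b8 b9 b10 b11 b12 b13 b14
  decide
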